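-- pv_equiv track=rewrite | github.com/Sanghyeok-Jeon/Algorithms_Python | 백준/Silver/2725. 보이는 점의 개수/보이는 점의 개수.py | precompute_visible_points
-- ===== SOURCE A (Python) =====
-- def precompute_visible_points(max_n):
--     phi = list(range(max_n + 1))
--     visible_points = [0] * (max_n + 1)
--
--     for i in range(2, max_n + 1):
--         if phi[i]== i:
--             for j in range(i, max_n + 1, i):
--                 phi[j] *= (i - 1)
--                 phi[j] //= i
--
--     for i in range(1, max_n + 1):
--         visible_points[i] = visible_points[i - 1] + phi[i]
--
--     return visible_points
-- ===== SOURCE B (Python) =====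
-- def precompute_visible_points(max_n):
--     # Linear (Euler) sieve: each composite is marked exactly once, via its
--     # smallest prime factor; phi[i] == 0 (for i >= 2) means i is prime.
--     phi = [0] * (max_n + 1)
--     if max_n >= 1:
--         phi[1] = 1
--     primes = []
--     for i in range(2, max_n + 1):
--         if phi[i] == 0:
--             phi[i] = i - 1
--             primes.append(i)
--         for p in primes:
--             if p * i > max_n:
--                 break
--             if i % p == 0:
--                 phi[p * i] = phi[i] * p
--                 break
--             phi[p * i] = phi[i] * (p - 1)
--     visible = [0] * (max_n + 1)
--     total = 0
--     for i in range(1, max_n + 1):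
--         total += phi[i]
--         visible[i] = total
--     return visible
-- ===== Notes on version B (the rewrite author's own statement) =====
-- stated objective: faster
-- what changed: Replaces the Eratosthenes-style totient sieve (for every prime, walk all its multiples multiplying by (p-1) and floor-dividing by p) with a linear Euler sieve that maintains the list of primes found and sets each composite's totient exactly once from its smallest prime factor, plus a running-total prefix sum.
import Mathlib
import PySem

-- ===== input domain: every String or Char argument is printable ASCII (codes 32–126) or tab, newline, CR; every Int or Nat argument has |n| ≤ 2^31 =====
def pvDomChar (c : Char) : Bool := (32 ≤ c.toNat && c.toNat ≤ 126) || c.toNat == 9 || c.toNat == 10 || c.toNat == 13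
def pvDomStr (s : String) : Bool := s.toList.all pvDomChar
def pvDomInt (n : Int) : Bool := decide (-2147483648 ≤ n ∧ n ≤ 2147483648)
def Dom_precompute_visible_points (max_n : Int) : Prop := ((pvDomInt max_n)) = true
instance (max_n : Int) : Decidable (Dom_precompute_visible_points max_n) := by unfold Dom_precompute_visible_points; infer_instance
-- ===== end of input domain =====

-- B replaces A's Eratosthenes-style totient sieve by a linear (Euler) sieve that sets each
-- composite's totient exactly once from its smallest prime factor (objective: faster).


-- ===== PORT A =====
def precompute_visible_points (max_n : Int) : List Int :=
  let phi0 := PySem.List.pyRange 0 (max_n + 1) 1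
  let vis0 := List.replicate (max_n + 1).toNat (0 : Int)
  let phi := (PySem.List.pyRange 2 (max_n + 1) 1).foldl (fun phi i =>
    if PySem.List.pyGetD phi i 0 == i then
      (PySem.List.pyRange i (max_n + 1) i).foldl (fun phi j =>
        PySem.List.pySetD phi j
          (PySem.Int.floordiv (PySem.List.pyGetD phi j 0 * (i - 1)) i)) phi
    else phi) phi0
  (PySem.List.pyRange 1 (max_n + 1) 1).foldl (fun vis i =>
    PySem.List.pySetD vis i
      (PySem.List.pyGetD vis (i - 1) 0 + PySem.List.pyGetD phi i 0)) vis0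

-- ===== PORT B =====
-- helper: the inner `for p in primes: ... break` loop of B
def pvB_mark (max_n i : Int) : List Int → List Int → List Int
  | phi, [] => phi
  | phi, p :: ps =>
    if p * i > max_n then phi
    else if PySem.Int.mod i p == 0 then
      PySem.List.pySetD phi (p * i) (PySem.List.pyGetD phi i 0 * p)
    else
      pvB_mark max_n i (PySem.List.pySetD phi (p * i) (PySem.List.pyGetD phi i 0 * (p - 1))) ps

def precompute_visible_points_alt (max_n : Int) : List Int :=
  let phi0 := List.replicate (max_n + 1).toNat (0 : Int)
  let phi1 := if max_n ≥ 1 then PySem.List.pySetD phi0 1 1 else phi0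
  let st := (PySem.List.pyRange 2 (max_n + 1) 1).foldl
    (fun (st : List Int × List Int) i =>
      let phi := st.1
      let primes := st.2
      let st2 :=
        if PySem.List.pyGetD phi i 0 == 0 then
          (PySem.List.pySetD phi i (i - 1), primes ++ [i])
        else (phi, primes)
      (pvB_mark max_n i st2.1 st2.2, st2.2)) (phi1, ([] : List Int))
  let phi := st.1
  let fin := (PySem.List.pyRange 1 (max_n + 1) 1).foldl
    (fun (acc : Int × List Int) i =>
      let total := acc.1 + PySem.List.pyGetD phi i 0
      (total, PySem.List.pySetD acc.2 i total))
    ((0 : Int), List.replicate (max_n + 1).toNat (0 : Int))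
  fin.2

-- ===== PRECONDITION & SPEC =====
def Spec_precompute_visible_points (max_n : Int) (out : List Int) : Prop := out = precompute_visible_points_alt max_n
instance (max_n : Int) (out : List Int) : Decidable (Spec_precompute_visible_points max_n out) := by unfold Spec_precompute_visible_points; infer_instance

-- ===== CLAIM (what is proved, stated in full; the proofs are below) =====
def Claim_equal_precompute_visible_points : Prop := ∀ (max_n : Int), Dom_precompute_visible_points max_n → Spec_precompute_visible_points max_n (precompute_visible_points max_n)

-- ===== LEMMAS AND PROOFS =====

-- ---------- shared arithmetic spec ----------

/-- totient as `Int`. -/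
def pvPhi (k : Nat) : Int := (Nat.totient k : Int)

/-- prefix sums of totient, as `Int`. -/
def pvS (k : Nat) : Int := ((∑ t ∈ Finset.range (k+1), Nat.totient t : Nat) : Int)

/-- length of the arrays. -/
def pvM (N : Int) : Nat := (N + 1).toNat

/-- the common result both ports compute. -/
def pvTarget (N : Int) : List Int := (List.range (pvM N)).map pvS

def pvPhiL (N : Int) : List Int := (List.range (pvM N)).map pvPhi

-- ---------- generic map/range list lemmas ----------

lemma pv_set_map (M k0 : Nat) (f : Nat → Int) (v : Int) :
    ((List.range M).map f).set k0 v
      = (List.range M).map (fun k => if k = k0 then v else f k) := by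
  apply List.ext_getElem
  · simp
  · intro i h1 h2
    simp only [List.getElem_set, List.getElem_map, List.getElem_range]
    split
    · simp_all
    · simp [Ne.symm ‹¬ k0 = i›]

lemma pv_getD_map (M k0 : Nat) (f : Nat → Int) (hk : k0 < M) :
    ((List.range M).map f).getD k0 0 = f k0 := by
  rw [List.getD_eq_getElem?_getD]
  simp [hk]

lemma pv_pyGetD_map (M : Nat) (f : Nat → Int) (j : Int) (h0 : 0 ≤ j) (hj : j.toNat < M) :
    PySem.List.pyGetD ((List.range M).map f) j 0 = f j.toNat := by
  rw [PySem.List.pyGetD_of_nonneg _ _ h0]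
  exact pv_getD_map M j.toNat f hj

lemma pv_pySetD_map (M : Nat) (f : Nat → Int) (j v : Int) (h0 : 0 ≤ j) :
    PySem.List.pySetD ((List.range M).map f) j v
      = (List.range M).map (fun k => if k = j.toNat then v else f k) := by
  rw [PySem.List.pySetD_of_nonneg _ _ h0]
  exact pv_set_map M j.toNat f v

-- ---------- the partial-sieve value pvF (port A's invariant) ----------

def pvApart (i j : Nat) : Nat :=
  ∏ p ∈ j.primeFactors.filter (fun p => p ≤ i), p ^ j.factorization p

def pvBpart (i j : Nat) : Nat :=
  ∏ p ∈ j.primeFactors.filter (fun p => ¬ p ≤ i), p ^ j.factorization p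

def pvF (i j : Nat) : Int := if j = 0 then 0 else ((pvApart i j).totient * pvBpart i j : Nat)

lemma pv_prod_all (j : Nat) (hj : j ≠ 0) :
    ∏ p ∈ j.primeFactors, p ^ j.factorization p = j := by
  conv_rhs => rw [← Nat.prod_factorization_pow_eq_self hj]
  rw [Finsupp.prod, Nat.support_factorization]

lemma pv_split (i j : Nat) (hj : j ≠ 0) : pvApart i j * pvBpart i j = j := by
  unfold pvApart pvBpart
  rw [Finset.prod_filter_mul_prod_filter_not]
  exact pv_prod_all j hj

lemma pv_Apart_pos (i j : Nat) : 0 < pvApart i j := by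
  unfold pvApart
  exact Finset.prod_pos fun p hp =>
    pow_pos (Nat.prime_of_mem_primeFactors (Finset.mem_filter.mp hp).1).pos _

lemma pv_Bpart_pos (i j : Nat) : 0 < pvBpart i j := by
  unfold pvBpart
  exact Finset.prod_pos fun p hp =>
    pow_pos (Nat.prime_of_mem_primeFactors (Finset.mem_filter.mp hp).1).pos _

lemma pvF_one (j : Nat) : pvF 1 j = (j : Int) := by
  unfold pvF
  by_cases hj : j = 0
  · simp [hj]
  · have h1 : j.primeFactors.filter (fun p => p ≤ 1) = ∅ := by
      rw [Finset.filter_eq_empty_iff]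
      intro p hp
      have := (Nat.prime_of_mem_primeFactors hp).two_le
      omega
    have h2 : j.primeFactors.filter (fun p => ¬ p ≤ 1) = j.primeFactors := by
      rw [Finset.filter_true_of_mem]
      intro p hp
      have := (Nat.prime_of_mem_primeFactors hp).two_le
      omega
    simp only [hj, ite_false]
    have hn : (pvApart 1 j).totient * pvBpart 1 j = j := by
      unfold pvApart pvBpart
      rw [h1, Finset.prod_empty, Nat.totient_one, one_mul, h2, pv_prod_all j hj]
    exact_mod_cast hn

lemma pvF_final (i j : Nat) (h : ∀ p ∈ j.primeFactors, p ≤ i) : pvF i j = pvPhi j := by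
  unfold pvF pvPhi
  by_cases hj : j = 0
  · simp [hj]
  · have h1 : j.primeFactors.filter (fun p => p ≤ i) = j.primeFactors :=
      Finset.filter_true_of_mem h
    have h2 : j.primeFactors.filter (fun p => ¬ p ≤ i) = ∅ := by
      rw [Finset.filter_eq_empty_iff]
      intro p hp
      simp [h p hp]
    simp only [hj, ite_false]
    have hn : (pvApart i j).totient * pvBpart i j = j.totient := by
      unfold pvApart pvBpart
      rw [h2, Finset.prod_empty, mul_one, h1, pv_prod_all j hj]
    exact_mod_cast hn

lemma pvF_nochange (i j : Nat) (h : i ∉ j.primeFactors) : pvF i j = pvF (i-1) j := by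
  unfold pvF pvApart pvBpart
  have h1 : j.primeFactors.filter (fun p => p ≤ i) = j.primeFactors.filter (fun p => p ≤ i - 1) := by
    apply Finset.filter_congr
    intro p hp
    have hne : p ≠ i := fun he => h (he ▸ hp)
    constructor <;> (intro; omega)
  have h2 : j.primeFactors.filter (fun p => ¬ p ≤ i) = j.primeFactors.filter (fun p => ¬ p ≤ i - 1) := by
    apply Finset.filter_congr
    intro p hp
    have hne : p ≠ i := fun he => h (he ▸ hp)
    have hp2 := (Nat.prime_of_mem_primeFactors hp).two_le
    constructor <;> (intro; simp_all; omega)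
  rw [h1, h2]

lemma pvF_step (i j : Nat) (h : i ∈ j.primeFactors) :
    pvF (i-1) j * ((i : Int) - 1) = pvF i j * i := by
  have hj : j ≠ 0 := Nat.pos_of_ne_zero (fun h0 => by simp [h0] at h) |>.ne'
  have hi : i.Prime := Nat.prime_of_mem_primeFactors h
  have hi2 := hi.two_le
  have hdvd : i ∣ j := Nat.dvd_of_mem_primeFactors h
  set v := j.factorization i with hv
  have hv1 : 1 ≤ v := (Nat.Prime.factorization_pos_of_dvd hi hj hdvd)
  have hA : pvApart i j = i ^ v * pvApart (i-1) j := by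
    unfold pvApart
    have hins : j.primeFactors.filter (fun p => p ≤ i)
        = insert i (j.primeFactors.filter (fun p => p ≤ i - 1)) := by
      ext p
      simp only [Finset.mem_filter, Finset.mem_insert]
      constructor
      · rintro ⟨hp, hpi⟩
        rcases eq_or_ne p i with he | hne
        · exact Or.inl he
        · exact Or.inr ⟨hp, by omega⟩
      · rintro (he | ⟨hp, hpi⟩)
        · exact ⟨he ▸ h, by omega⟩
        · exact ⟨hp, by omega⟩
    rw [hins, Finset.prod_insert (by
      simp only [Finset.mem_filter, not_and]
      intro _
      omega)]
  have hB : pvBpart (i-1) j = i ^ v * pvBpart i j := by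
    unfold pvBpart
    have hins : j.primeFactors.filter (fun p => ¬ p ≤ i - 1)
        = insert i (j.primeFactors.filter (fun p => ¬ p ≤ i)) := by
      ext p
      simp only [Finset.mem_filter, Finset.mem_insert]
      constructor
      · rintro ⟨hp, hpi⟩
        rcases eq_or_ne p i with he | hne
        · exact Or.inl he
        · exact Or.inr ⟨hp, by omega⟩
      · rintro (he | ⟨hp, hpi⟩)
        · exact ⟨he ▸ h, by omega⟩
        · exact ⟨hp, by omega⟩
    rw [hins, Finset.prod_insert (by
      simp only [Finset.mem_filter, not_and]
      intro _
      omega)]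
  have hcop : Nat.Coprime (i ^ v) (pvApart (i-1) j) := by
    apply Nat.Coprime.pow_left
    unfold pvApart
    apply Nat.Coprime.prod_right
    intro p hp
    obtain ⟨hpf, hple⟩ := Finset.mem_filter.mp hp
    have hpp := Nat.prime_of_mem_primeFactors hpf
    exact Nat.Coprime.pow_right _ ((Nat.coprime_primes hi hpp).mpr (by omega))
  have htot : (pvApart i j).totient
      = i ^ (v - 1) * (i - 1) * (pvApart (i-1) j).totient := by
    rw [hA, Nat.totient_mul hcop, Nat.totient_prime_pow hi hv1]
  have hcast : ((i : Int) - 1) = ((i - 1 : Nat) : Int) := by omega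
  unfold pvF
  simp only [hj, ite_false]
  rw [hcast]
  push_cast
  rw [hB, htot]
  have hiv : i ^ v = i ^ (v - 1) * i := by
    conv_lhs => rw [show v = (v - 1) + 1 by omega]
    rw [pow_succ]
  push_cast [hiv]
  ring

lemma pvF_floordiv (i j : Nat) (hi : 2 ≤ i) (h : i ∈ j.primeFactors) :
    PySem.Int.floordiv (pvF (i-1) j * ((i:Int) - 1)) i = pvF i j := by
  have hpos : (0:Int) < i := by exact_mod_cast Nat.lt_of_lt_of_le (by norm_num) hi
  rw [pvF_step i j h, PySem.Int.floordiv_eq_ediv_of_pos hpos,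
    Int.mul_ediv_cancel _ (by exact_mod_cast hpos.ne')]

lemma pvF_prime_test (i : Nat) (hi : 2 ≤ i) : pvF (i-1) i = (i : Int) ↔ i.Prime := by
  have hi0 : i ≠ 0 := by omega
  constructor
  · intro he
    by_contra hnp
    -- i composite: its least prime factor is < i, so pvF (i-1) i < i
    set p := i.minFac with hp
    have hpp : p.Prime := Nat.minFac_prime (by omega)
    have hpd : p ∣ i := Nat.minFac_dvd i
    have hpi : p < i := by
      rcases Nat.lt_or_ge p i with h | h
      · exact h
      · have : p = i := Nat.le_antisymm (Nat.minFac_le (by omega)) h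
        exact absurd (this ▸ hpp) hnp
    have hmem : p ∈ (i.primeFactors.filter (fun q => q ≤ i - 1)) := by
      rw [Finset.mem_filter, Nat.mem_primeFactors]
      exact ⟨⟨hpp, hpd, hi0⟩, by omega⟩
    have hdvdA : p ^ i.factorization p ∣ pvApart (i-1) i :=
      Finset.dvd_prod_of_mem _ hmem
    have hvp : 1 ≤ i.factorization p := Nat.Prime.factorization_pos_of_dvd hpp hi0 hpd
    have hA2 : 2 ≤ pvApart (i-1) i := by
      have h2 : 2 ≤ p ^ i.factorization p :=
        le_trans hpp.two_le (Nat.le_self_pow (by omega) p)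
      exact le_trans h2 (Nat.le_of_dvd (pv_Apart_pos _ _) hdvdA)
    have hlt : (pvApart (i-1) i).totient * pvBpart (i-1) i < i := by
      calc (pvApart (i-1) i).totient * pvBpart (i-1) i
          < pvApart (i-1) i * pvBpart (i-1) i :=
            (Nat.mul_lt_mul_right (pv_Bpart_pos _ _)).mpr (Nat.totient_lt _ (by omega))
        _ = i := pv_split _ _ hi0
    have : pvF (i-1) i < (i : Int) := by
      unfold pvF
      simp only [hi0, ite_false]
      exact_mod_cast hlt
    omega
  · intro hp
    unfold pvF
    simp only [hi0, ite_false]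
    have hpf : i.primeFactors = {i} := Nat.Prime.primeFactors hp
    have h1 : i.primeFactors.filter (fun q => q ≤ i - 1) = ∅ := by
      rw [hpf, Finset.filter_eq_empty_iff]
      intro q hq
      simp at hq
      omega
    have h2 : i.primeFactors.filter (fun q => ¬ q ≤ i - 1) = {i} := by
      rw [hpf, Finset.filter_true_of_mem]
      intro q hq
      simp at hq
      omega
    have hn : (pvApart (i-1) i).totient * pvBpart (i-1) i = i := by
      unfold pvApart pvBpart
      rw [h1, Finset.prod_empty, Nat.totient_one, one_mul, h2, Finset.prod_singleton,
        hp.factorization_self, pow_one]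
    exact_mod_cast hn

-- ---------- port A: inner loop ----------

lemma pv_inner_A_aux (N q : Int) (hq : 0 < q) (g : Int → Int) (f : Nat → Int) (n : Nat)
    (hn : q * n ≤ N) :
    ((List.range n).map (fun (t : Nat) => q + q * (t:Int))).foldl
        (fun l j => PySem.List.pySetD l j (g (PySem.List.pyGetD l j 0)))
        ((List.range (pvM N)).map f)
      = (List.range (pvM N)).map
          (fun (k : Nat) => if q ≤ (k:Int) ∧ (k:Int) ≤ q * n ∧ q ∣ (k:Int)
            then g (f k) else f k) := by
  induction n with
  | zero =>
    simp only [List.range_zero, List.map_nil, List.foldl_nil]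
    apply List.map_congr_left
    intro k _
    rw [if_neg]
    rintro ⟨h1, h2, -⟩
    push_cast at h2
    omega
  | succ n ih =>
    have hn' : q * n ≤ N := by push_cast at hn ⊢; nlinarith
    rw [List.range_succ, List.map_append, List.foldl_append, ih hn']
    simp only [List.map_cons, List.map_nil, List.foldl_cons, List.foldl_nil]
    have h0 : (0:Int) ≤ q + q * n := by positivity
    have hjN : q + q * n ≤ N := by push_cast at hn; nlinarith
    have hjM : (q + q * n).toNat < pvM N := by unfold pvM; omega
    rw [pv_pyGetD_map _ _ _ h0 hjM, pv_pySetD_map _ _ _ _ h0]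
    have hjeq : (((q + q * n).toNat : Nat) : Int) = q + q * n := Int.toNat_of_nonneg h0
    apply List.map_congr_left
    intro k hk
    have hkM : k < pvM N := List.mem_range.mp hk
    by_cases hkj : k = (q + q * n).toNat
    · subst hkj
      have hinner : ¬ (q ≤ (((q + q * (n:Int)).toNat : Nat) : Int)
          ∧ (((q + q * (n:Int)).toNat : Nat) : Int) ≤ q * n
          ∧ q ∣ (((q + q * (n:Int)).toNat : Nat) : Int)) := by
        rw [hjeq]
        rintro ⟨-, h2, -⟩
        nlinarith
      have hcondR : q ≤ (((q + q * (n:Int)).toNat : Nat) : Int)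
          ∧ (((q + q * (n:Int)).toNat : Nat) : Int) ≤ q * ((n:Int) + 1)
          ∧ q ∣ (((q + q * (n:Int)).toNat : Nat) : Int) := by
        rw [hjeq]
        refine ⟨by nlinarith, by nlinarith, ⟨(n:Int) + 1, by ring⟩⟩
      rw [if_pos rfl, if_neg hinner, if_pos (by exact_mod_cast hcondR)]
    · rw [if_neg hkj]
      have hkne : (k : Int) ≠ q + q * n := by
        intro he
        apply hkj
        omega
      by_cases hc : q ≤ (k:Int) ∧ (k:Int) ≤ q * n ∧ q ∣ (k:Int)
      · rw [if_pos hc, if_pos ⟨hc.1, by push_cast; nlinarith [hc.2.1], hc.2.2⟩]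
      · rw [if_neg hc, if_neg]
        rintro ⟨h1, h2, h3⟩
        apply hc
        refine ⟨h1, ?_, h3⟩
        obtain ⟨c, hcc⟩ := h3
        have hcn : c ≤ n := by
          by_contra hgt
          push Not at hgt
          have : c = n + 1 := by push_cast at h2; nlinarith
          apply hkne
          rw [hcc, this]
          ring
        rw [hcc]
        exact mul_le_mul_of_nonneg_left (by exact_mod_cast hcn) hq.le

lemma pv_inner_A (N q : Int) (hq : 0 < q) (g : Int → Int) (f : Nat → Int) :
    (PySem.List.pyRange q (N+1) q).foldl
        (fun l j => PySem.List.pySetD l j (g (PySem.List.pyGetD l j 0)))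
        ((List.range (pvM N)).map f)
      = (List.range (pvM N)).map
          (fun (k : Nat) => if q ≤ (k:Int) ∧ q ∣ (k:Int) then g (f k) else f k) := by
  rw [PySem.List.pyRange_of_pos _ _ hq]
  by_cases hlt : q < N + 1
  · have hcount : (if q < N + 1 then ((N + 1 - q + q - 1) / q).toNat else 0)
        = (N / q).toNat := by
      rw [if_pos hlt]
      congr 1
      congr 1
      ring
    rw [hcount]
    have hNq0 : 0 ≤ N / q := Int.ediv_nonneg (by omega) hq.le
    have hncast : (((N / q).toNat : Nat) : Int) = N / q := Int.toNat_of_nonneg hNq0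
    have hqn : q * ((N / q).toNat : Int) ≤ N := by
      rw [hncast, mul_comm]
      exact Int.ediv_mul_le N hq.ne'
    rw [pv_inner_A_aux N q hq g f _ hqn]
    apply List.map_congr_left
    intro k hk
    have hkM : k < pvM N := List.mem_range.mp hk
    have hkN : (k : Int) ≤ N := by unfold pvM at hkM; omega
    by_cases hc : q ≤ (k:Int) ∧ q ∣ (k:Int)
    · rw [if_pos hc, if_pos]
      refine ⟨hc.1, ?_, hc.2⟩
      obtain ⟨c, hcc⟩ := hc.2
      have hcle : c ≤ N / q := by
        rw [Int.le_ediv_iff_mul_le hq]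
        nlinarith [hcc ▸ hkN]
      rw [hcc, hncast]
      exact mul_le_mul_of_nonneg_left hcle hq.le
    · rw [if_neg hc, if_neg]
      rintro ⟨h1, h2, h3⟩
      exact hc ⟨h1, h3⟩
  · rw [if_neg hlt]
    simp only [List.range_zero, List.map_nil, List.foldl_nil]
    apply List.map_congr_left
    intro k hk
    have hkM : k < pvM N := List.mem_range.mp hk
    rw [if_neg]
    rintro ⟨h1, -⟩
    unfold pvM at hkM
    omega

-- ---------- port A: outer loop ----------

lemma pv_outer_A (N : Int) (c : Nat) (hc : (2 + (c:Int)) ≤ N + 1) :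
    (PySem.List.pyRange 2 (2 + (c:Int)) 1).foldl
        (fun phi i =>
          if PySem.List.pyGetD phi i 0 == i then
            (PySem.List.pyRange i (N + 1) i).foldl (fun phi j =>
              PySem.List.pySetD phi j
                (PySem.Int.floordiv (PySem.List.pyGetD phi j 0 * (i - 1)) i)) phi
          else phi)
        ((List.range (pvM N)).map (fun k => pvF 1 k))
      = (List.range (pvM N)).map (fun k => pvF (1 + c) k) := by
  induction c with
  | zero =>
    rw [show ((0:Nat):Int) = 0 by norm_num]
    rw [PySem.List.pyRange_one_eq_nil (by omega)]
    rfl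
  | succ c ih =>
    have hc' : 2 + (c:Int) ≤ N + 1 := by push_cast at hc ⊢; omega
    rw [show (2 + ((c+1:Nat):Int)) = (2 + (c:Int)) + 1 by push_cast; ring]
    rw [PySem.List.pyRange_one_succ_right (by omega), List.foldl_append, ih hc']
    simp only [List.foldl_cons, List.foldl_nil]
    set m : Nat := c + 2 with hm
    have him : (2 + (c:Int)) = (m:Int) := by omega
    have hmN : (m:Int) ≤ N := by omega
    have h0 : (0:Int) ≤ (m:Int) := by positivity
    have hjM : ((m:Int)).toNat < pvM N := by unfold pvM; omega
    have h1c : 1 + c = m - 1 := by omega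
    rw [him, pv_pyGetD_map _ _ _ h0 hjM]
    rw [show ((m:Int)).toNat = m by omega]
    have hm2 : 2 ≤ m := by omega
    have htest := pvF_prime_test m hm2
    rw [h1c]
    by_cases hval : pvF (m-1) m = (m:Int)
    · have hb : (pvF (m-1) m == (m:Int)) = true := beq_iff_eq.mpr hval
      rw [hb, if_pos rfl]
      have hprime : m.Prime := htest.mp hval
      rw [pv_inner_A N (m:Int) (by positivity) (fun x => PySem.Int.floordiv (x * ((m:Int) - 1)) (m:Int)) (pvF (m-1))]
      apply List.map_congr_left
      intro k hk
      have hkM : k < pvM N := List.mem_range.mp hk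
      have h1c2 : 1 + (c + 1) = m := by omega
      rw [h1c2]
      by_cases hcnd : (m:Int) ≤ (k:Int) ∧ (m:Int) ∣ (k:Int)
      · rw [if_pos hcnd]
        have hk0 : k ≠ 0 := by
          have := hcnd.1
          omega
        have hdvd : m ∣ k := by exact_mod_cast hcnd.2
        have hmem : m ∈ k.primeFactors := Nat.mem_primeFactors.mpr ⟨hprime, hdvd, hk0⟩
        exact pvF_floordiv m k hm2 hmem
      · rw [if_neg hcnd]
        rw [pvF_nochange m k]
        intro hmem
        apply hcnd
        obtain ⟨-, hdvd, hk0⟩ := Nat.mem_primeFactors.mp hmem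
        exact ⟨by exact_mod_cast Nat.le_of_dvd (Nat.pos_of_ne_zero hk0) hdvd,
          by exact_mod_cast hdvd⟩
    · have hb : (pvF (m-1) m == (m:Int)) = false := beq_eq_false_iff_ne.mpr hval
      rw [hb, if_neg (by simp)]
      have hnp : ¬ m.Prime := fun hp => hval (htest.mpr hp)
      apply List.map_congr_left
      intro k hk
      have h1c2 : 1 + (c + 1) = m := by omega
      rw [h1c2, pvF_nochange m k]
      intro hmem
      exact hnp (Nat.prime_of_mem_primeFactors hmem)

lemma pv_phase1_A (N : Int) :
    (PySem.List.pyRange 2 (N + 1) 1).foldl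
        (fun phi i =>
          if PySem.List.pyGetD phi i 0 == i then
            (PySem.List.pyRange i (N + 1) i).foldl (fun phi j =>
              PySem.List.pySetD phi j
                (PySem.Int.floordiv (PySem.List.pyGetD phi j 0 * (i - 1)) i)) phi
          else phi)
        (PySem.List.pyRange 0 (N + 1) 1)
      = pvPhiL N := by
  have hinit : PySem.List.pyRange 0 (N + 1) 1
      = (List.range (pvM N)).map (fun k => pvF 1 k) := by
    rw [PySem.List.pyRange_one]
    rw [show (N + 1 - 0).toNat = pvM N by unfold pvM; omega]
    apply List.map_congr_left
    intro k _
    rw [pvF_one]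
    omega
  rw [hinit]
  by_cases hN : 2 ≤ N
  · set c : Nat := (N - 1).toNat with hcdef
    have hNc : N + 1 = 2 + (c:Int) := by omega
    rw [show PySem.List.pyRange 2 (N + 1) 1 = PySem.List.pyRange 2 (2 + (c:Int)) 1 by rw [hNc]]
    rw [pv_outer_A N c (by omega)]
    unfold pvPhiL
    apply List.map_congr_left
    intro k hk
    have hkM : k < pvM N := List.mem_range.mp hk
    apply pvF_final
    intro p hp
    obtain ⟨-, hdvd, hk0⟩ := Nat.mem_primeFactors.mp hp
    have : p ≤ k := Nat.le_of_dvd (Nat.pos_of_ne_zero hk0) hdvd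
    unfold pvM at hkM
    omega
  · rw [PySem.List.pyRange_one_eq_nil (by omega), List.foldl_nil]
    unfold pvPhiL
    apply List.map_congr_left
    intro k hk
    have hkM : k < pvM N := List.mem_range.mp hk
    have hk1 : k = 0 ∨ k = 1 := by unfold pvM at hkM; omega
    apply pvF_final
    intro p hp
    rcases hk1 with h | h <;> subst h <;> simp at hp

-- ---------- prefix-sum passes ----------

lemma pv_prefix_A (N : Int) (c : Nat) (hc : (c:Int) ≤ N) :
    (PySem.List.pyRange 1 (1 + (c:Int)) 1).foldl
        (fun vis i => PySem.List.pySetD vis i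
          (PySem.List.pyGetD vis (i - 1) 0 + PySem.List.pyGetD (pvPhiL N) i 0))
        ((List.range (pvM N)).map (fun _ => (0:Int)))
      = (List.range (pvM N)).map (fun k => if k ≤ c then pvS k else 0) := by
  induction c with
  | zero =>
    rw [show ((0:Nat):Int) = 0 by norm_num]
    rw [PySem.List.pyRange_one_eq_nil (by omega), List.foldl_nil]
    apply List.map_congr_left
    intro k _
    by_cases h : k ≤ 0
    · rw [if_pos h]
      have : k = 0 := by omega
      subst this
      simp [pvS]
    · rw [if_neg h]
  | succ c ih =>
    have hc' : (c:Int) ≤ N := by push_cast at hc ⊢; omega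
    rw [show (1 + ((c+1:Nat):Int)) = (1 + (c:Int)) + 1 by push_cast; ring]
    rw [PySem.List.pyRange_one_succ_right (by omega), List.foldl_append, ih hc']
    simp only [List.foldl_cons, List.foldl_nil]
    have hm1 : (1 + (c:Int)) - 1 = ((c:Nat):Int) := by omega
    have hcM : ((c:Nat):Int).toNat < pvM N := by unfold pvM; omega
    have him : (1 + (c:Int)) = (((c+1:Nat)):Int) := by push_cast; ring
    have hc1M : (((c+1:Nat)):Int).toNat < pvM N := by unfold pvM; omega
    rw [hm1, pv_pyGetD_map _ _ _ (by positivity) hcM]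
    rw [him]
    unfold pvPhiL
    rw [pv_pyGetD_map _ _ _ (by positivity) hc1M, pv_pySetD_map _ _ _ _ (by positivity)]
    rw [show ((((c+1:Nat)):Int)).toNat = c + 1 by omega]
    rw [show (((c:Nat)):Int).toNat = c by omega]
    rw [if_pos (le_refl c)]
    have hstep : pvS c + pvPhi (c+1) = pvS (c+1) := by
      unfold pvS pvPhi
      rw [Finset.sum_range_succ (n := c+1)]
      push_cast
      ring
    rw [hstep]
    apply List.map_congr_left
    intro k _
    by_cases hk : k = c + 1
    · subst hk
      rw [if_pos rfl, if_pos (le_refl _)]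
    · rw [if_neg hk]
      by_cases hk2 : k ≤ c
      · rw [if_pos hk2, if_pos (by omega)]
      · rw [if_neg hk2, if_neg (by omega)]

lemma pv_replicate_map (M : Nat) : List.replicate M (0:Int) = (List.range M).map (fun _ => (0:Int)) := by
  apply List.ext_getElem <;> simp

theorem pv_A_eq (N : Int) : precompute_visible_points N = pvTarget N := by
  simp only [precompute_visible_points]
  rw [show (N + 1).toNat = pvM N from rfl]
  rw [pv_phase1_A, pv_replicate_map]
  by_cases hN : 0 ≤ N
  · set c : Nat := N.toNat with hcdef
    rw [show PySem.List.pyRange 1 (N + 1) 1 = PySem.List.pyRange 1 (1 + (c:Int)) 1 by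
      congr 1
      omega]
    rw [pv_prefix_A N c (by omega)]
    unfold pvTarget
    apply List.map_congr_left
    intro k hk
    have hkM : k < pvM N := List.mem_range.mp hk
    rw [if_pos (by unfold pvM at hkM; omega)]
  · have hM : pvM N = 0 := by unfold pvM; omega
    rw [PySem.List.pyRange_one_eq_nil (by omega), List.foldl_nil]
    unfold pvTarget
    rw [hM]
    simp

-- ---------- port B: the invariant function pvG ----------

def pvG (i k : Nat) : Int :=
  if k ≤ 1 then (k : Int)
  else if k ≤ i ∨ (¬ k.Prime ∧ k / k.minFac ≤ i) then pvPhi k else 0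

def pvPrimesL (m : Nat) : List Int :=
  List.map (fun p : Nat => (p : Int)) (List.filter (fun p => decide (Nat.Prime p)) (List.range (m+1)))

lemma pv_minFac_mul (p m : Nat) (hp : p.Prime) (hm : 2 ≤ m) (hle : p ≤ m.minFac) :
    (p * m).minFac = p := by
  have hp2 := hp.two_le
  have hne1 : p * m ≠ 1 := by nlinarith
  have h1 : (p * m).minFac ≤ p := Nat.minFac_le_of_dvd hp2 ⟨m, rfl⟩
  have hq : (p * m).minFac.Prime := Nat.minFac_prime hne1
  have hdvd : (p * m).minFac ∣ p * m := Nat.minFac_dvd _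
  rcases (Nat.Prime.dvd_mul hq).mp hdvd with h | h
  · exact (Nat.prime_dvd_prime_iff_eq hq hp).mp h
  · have h2 : m.minFac ≤ (p * m).minFac := Nat.minFac_le_of_dvd hq.two_le h
    omega

lemma pv_composite_mul (q m : Nat) (hq : q.Prime) (hm : 2 ≤ m) : ¬ (q * m).Prime := by
  intro hk
  rcases (Nat.Prime.eq_one_or_self_of_dvd hk q ⟨m, rfl⟩) with h | h
  · exact hq.one_lt.ne' h
  · have := hq.two_le
    nlinarith [h]

lemma pv_newly_marked (m k : Nat) (hm : 2 ≤ m) :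
    (∃ q : Nat, q.Prime ∧ q ≤ m.minFac ∧ k = q * m)
      ↔ (¬ k.Prime ∧ 2 ≤ k ∧ k / k.minFac = m) := by
  constructor
  · rintro ⟨q, hq, hle, rfl⟩
    have hq2 := hq.two_le
    refine ⟨pv_composite_mul q m hq hm, by nlinarith, ?_⟩
    rw [pv_minFac_mul q m hq hm hle, Nat.mul_div_cancel_left m (by omega)]
  · rintro ⟨hnp, hk2, hdiv⟩
    set p := k.minFac with hpdef
    have hp : p.Prime := Nat.minFac_prime (by omega)
    have hpd : p ∣ k := Nat.minFac_dvd k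
    have hkeq : k = p * m := by
      rw [← hdiv, Nat.mul_div_cancel' hpd]
    refine ⟨p, hp, ?_, hkeq⟩
    have hmf : m.minFac ∣ k := dvd_trans (Nat.minFac_dvd m) ⟨p, by rw [hkeq]; ring⟩
    have hmf2 : 2 ≤ m.minFac := (Nat.minFac_prime (by omega)).two_le
    exact Nat.minFac_le_of_dvd hmf2 hmf

lemma pv_mark_spec (N : Int) (m : Nat) (hm : 2 ≤ m) (hmN : (m:Int) ≤ N) :
    ∀ (ps : List Int) (f : Nat → Int),
      ps.Pairwise (· < ·) →
      (∀ p ∈ ps, ∃ q : Nat, q.Prime ∧ p = (q:Int)) →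
      ((m.minFac : Int) ∈ ps) →
      f m = pvPhi m →
      pvB_mark N (m:Int) ((List.range (pvM N)).map f) ps
        = (List.range (pvM N)).map
            (fun (k : Nat) => if ps.any (fun p =>
                decide (p * m ≤ N) && decide ((k:Int) = p * m) && decide (p ≤ (m.minFac : Int)))
              then pvPhi k else f k) := by
  intro ps
  induction ps with
  | nil =>
    intro f _ _ hmem _
    exact absurd hmem (List.not_mem_nil)
  | cons p ps ih =>
    intro f hsort hprimes hmem hfm
    obtain ⟨q, hq, rfl⟩ := hprimes p List.mem_cons_self
    have hq2 := hq.two_le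
    have hmM : ((m:Int)).toNat < pvM N := by unfold pvM; omega
    simp only [pvB_mark]
    by_cases hbig : (q:Int) * m > N
    · rw [if_pos hbig]
      symm
      apply List.map_congr_left
      intro k _
      rw [if_neg]
      intro hany
      obtain ⟨x, hx, hpx⟩ := List.any_eq_true.mp hany
      simp only [Bool.and_eq_true, decide_eq_true_eq] at hpx
      obtain ⟨⟨h1, -⟩, -⟩ := hpx
      rcases List.mem_cons.mp hx with rfl | hx'
      · omega
      · have hlt : (q:Int) < x := (List.pairwise_cons.mp hsort).1 x hx'
        nlinarith
    · rw [if_neg hbig]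
      have hble : (q:Int) * m ≤ N := by omega
      have hqm0 : (0:Int) ≤ (q:Int) * m := by positivity
      have hqmM : ((q:Int) * m).toNat < pvM N := by unfold pvM; omega
      have hqmcast : ((q * m : Nat) : Int) = (q:Int) * m := by push_cast; ring
      have hkm : q * m ≠ m := by nlinarith
      by_cases hdvd : q ∣ m
      · have hmod : (PySem.Int.mod (m:Int) (q:Int) == 0) = true := by
          rw [beq_iff_eq, PySem.Int.mod_eq_zero_iff_dvd]
          exact_mod_cast hdvd
        rw [hmod, if_pos rfl]
        have hqmf : q = m.minFac := by
          rcases List.mem_cons.mp hmem with h | h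
          · exact_mod_cast h.symm
          · exfalso
            have hlt : (q:Int) < m.minFac := (List.pairwise_cons.mp hsort).1 _ h
            have hge : m.minFac ≤ q := Nat.minFac_le_of_dvd hq2 hdvd
            omega
        rw [pv_pyGetD_map _ _ _ (by positivity) hmM, show ((m:Int)).toNat = m by omega, hfm]
        rw [pv_pySetD_map _ _ _ _ hqm0]
        apply List.map_congr_left
        intro k hk
        have hkM : k < pvM N := List.mem_range.mp hk
        by_cases hkq : k = q * m
        · subst hkq
          rw [if_pos (by omega), if_pos]
          · unfold pvPhi
            rw [show q * m = q * m from rfl]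
            rw [Nat.totient_mul_of_prime_of_dvd hq hdvd]
            push_cast
            ring
          · apply List.any_eq_true.mpr
            exact ⟨(q:Int), List.mem_cons_self, by
              simp only [Bool.and_eq_true, decide_eq_true_eq]
              exact ⟨⟨hble, by push_cast; ring⟩, by rw [← hqmf]⟩⟩
        · rw [if_neg (by omega), if_neg]
          intro hany
          obtain ⟨x, hx, hpx⟩ := List.any_eq_true.mp hany
          simp only [Bool.and_eq_true, decide_eq_true_eq] at hpx
          obtain ⟨⟨h1, h2⟩, h3⟩ := hpx
          rcases List.mem_cons.mp hx with rfl | hx'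
          · apply hkq
            have : ((q * m : Nat) : Int) = (k:Int) := by push_cast; omega
            exact_mod_cast this.symm
          · have hlt : (q:Int) < x := (List.pairwise_cons.mp hsort).1 x hx'
            rw [← hqmf] at h3
            omega
      · have hmod : (PySem.Int.mod (m:Int) (q:Int) == 0) = false := by
          rw [beq_eq_false_iff_ne]
          intro he
          exact hdvd (by exact_mod_cast (PySem.Int.mod_eq_zero_iff_dvd _ _).mp he)
        rw [hmod, if_neg (by simp)]
        rw [pv_pyGetD_map _ _ _ (by positivity) hmM, show ((m:Int)).toNat = m by omega, hfm]
        rw [pv_pySetD_map _ _ _ _ hqm0]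
        have hmemtail : (m.minFac : Int) ∈ ps := by
          rcases List.mem_cons.mp hmem with h | h
          · exfalso
            apply hdvd
            have : q = m.minFac := by exact_mod_cast h.symm
            rw [this]
            exact Nat.minFac_dvd m
          · exact h
        have hqlt : (q:Int) < (m.minFac : Int) := (List.pairwise_cons.mp hsort).1 _ hmemtail
        set f' : Nat → Int := fun k => if k = ((q:Int) * m).toNat then pvPhi m * ((q:Int) - 1) else f k with hf'
        rw [ih f' (List.pairwise_cons.mp hsort).2
          (fun x hx => hprimes x (List.mem_cons_of_mem _ hx)) hmemtail
          (by rw [hf']; simp only; rw [if_neg (by omega)]; exact hfm)]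
        apply List.map_congr_left
        intro k hk
        have hkM : k < pvM N := List.mem_range.mp hk
        have hphik : pvPhi (q * m) = pvPhi m * ((q:Int) - 1) := by
          unfold pvPhi
          rw [Nat.totient_mul ((Nat.Prime.coprime_iff_not_dvd hq).mpr hdvd),
            Nat.totient_prime hq]
          rw [Nat.cast_mul, Nat.cast_sub (by omega : 1 ≤ q)]
          push_cast
          ring
        by_cases hkq : k = q * m
        · subst hkq
          have hR : (((q:Int)::ps).any (fun p =>
              decide (p * m ≤ N) && decide (((q * m : Nat):Int) = p * m) && decide (p ≤ (m.minFac : Int)))) = true := by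
            apply List.any_eq_true.mpr
            exact ⟨(q:Int), List.mem_cons_self, by
              simp only [Bool.and_eq_true, decide_eq_true_eq]
              exact ⟨⟨hble, by push_cast; ring⟩, by omega⟩⟩
          rw [if_pos hR]
          by_cases hany : (ps.any (fun p =>
              decide (p * m ≤ N) && decide (((q * m : Nat):Int) = p * m) && decide (p ≤ (m.minFac : Int)))) = true
          · rw [if_pos hany]
          · rw [if_neg (by simpa using hany), hf']
            simp only
            rw [if_pos (by omega)]
            exact hphik.symm
        · have hkq' : ¬ (k:Int) = (q:Int) * m := by
            intro he
            apply hkq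
            exact_mod_cast hqmcast ▸ he
          have hcond : ((q:Int)::ps).any (fun p =>
                decide (p * m ≤ N) && decide (((k:Nat):Int) = p * m) && decide (p ≤ (m.minFac : Int)))
              = ps.any (fun p =>
                decide (p * m ≤ N) && decide (((k:Nat):Int) = p * m) && decide (p ≤ (m.minFac : Int))) := by
            rw [List.any_cons]
            have : (decide ((q:Int) * m ≤ N) && decide (((k:Nat):Int) = (q:Int) * m) && decide ((q:Int) ≤ (m.minFac : Int))) = false := by
              simp only [Bool.and_eq_false_iff, decide_eq_false_iff_not]
              left
              right
              exact hkq'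
            rw [this, Bool.false_or]
          rw [hcond]
          by_cases hany : (ps.any (fun p =>
              decide (p * m ≤ N) && decide (((k:Nat):Int) = p * m) && decide (p ≤ (m.minFac : Int)))) = true
          · rw [if_pos hany, if_pos hany]
          · rw [if_neg (by simpa using hany), if_neg (by simpa using hany), hf']
            simp only
            rw [if_neg (by omega)]

lemma pv_div_minFac_ge_two (k : Nat) (hk : 2 ≤ k) (hnp : ¬ k.Prime) :
    2 ≤ k / k.minFac := by
  have hd : k.minFac ∣ k := Nat.minFac_dvd k
  have h2 : 2 ≤ k.minFac := (Nat.minFac_prime (by omega)).two_le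
  have hpos : 1 ≤ k / k.minFac := Nat.one_le_div_iff (by omega) |>.mpr (Nat.minFac_le (by omega))
  rcases Nat.lt_or_ge (k / k.minFac) 2 with h | h
  · exfalso
    have h1 : k / k.minFac = 1 := by omega
    have : k = k.minFac := by
      conv_lhs => rw [← Nat.div_mul_cancel hd, h1, one_mul]
    exact hnp (this ▸ Nat.minFac_prime (by omega))
  · exact h

lemma pvG_le_one (i k : Nat) (hk : k ≤ 1) : pvG i k = (k : Int) := by
  unfold pvG
  rw [if_pos hk]

lemma pvG_eq_phi_of_le_one (i k : Nat) (hk : k ≤ 1) : pvG i k = pvPhi k := by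
  rw [pvG_le_one i k hk]
  interval_cases k <;> simp [pvPhi]

lemma pvG_composite_self (m : Nat) (hm : 2 ≤ m) (hnp : ¬ m.Prime) :
    pvG (m-1) m = pvPhi m := by
  unfold pvG
  rw [if_neg (by omega), if_pos]
  right
  refine ⟨hnp, ?_⟩
  have := Nat.div_lt_self (by omega : 0 < m) (Nat.minFac_prime (by omega : m ≠ 1)).one_lt
  omega

lemma pvG_prime_self (m : Nat) (hm : 2 ≤ m) (hp : m.Prime) :
    pvG (m-1) m = 0 := by
  unfold pvG
  rw [if_neg (by omega), if_neg]
  rintro (h | ⟨hnp, -⟩)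
  · omega
  · exact hnp hp

lemma pvPhi_pos (k : Nat) (hk : 1 ≤ k) : 0 < pvPhi k := by
  unfold pvPhi
  exact_mod_cast Nat.totient_pos.mpr (by omega)

lemma pvPrimesL_sorted (n : Nat) : (pvPrimesL n).Pairwise (· < ·) := by
  unfold pvPrimesL
  rw [List.pairwise_map]
  exact List.Pairwise.sublist List.filter_sublist
    ((List.pairwise_lt_range).imp (fun h => by exact_mod_cast h))

lemma pvPrimesL_primes (n : Nat) : ∀ p ∈ pvPrimesL n, ∃ q : Nat, q.Prime ∧ p = (q:Int) := by
  intro p hp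
  unfold pvPrimesL at hp
  obtain ⟨q, hq, rfl⟩ := List.mem_map.mp hp
  exact ⟨q, by simpa using (List.mem_filter.mp hq).2, rfl⟩

lemma pvPrimesL_mem (n x : Nat) (hx : x.Prime) (hle : x ≤ n) : (x:Int) ∈ pvPrimesL n := by
  unfold pvPrimesL
  exact List.mem_map_of_mem (List.mem_filter.mpr ⟨List.mem_range.mpr (by omega), by simpa using hx⟩)

lemma pvPrimesL_mem_le (n : Nat) (x : Int) (hx : x ∈ pvPrimesL n) :
    ∃ q : Nat, q.Prime ∧ q ≤ n ∧ x = (q:Int) := by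
  unfold pvPrimesL at hx
  obtain ⟨q, hq, rfl⟩ := List.mem_map.mp hx
  obtain ⟨hr, hp⟩ := List.mem_filter.mp hq
  exact ⟨q, by simpa using hp, by have := List.mem_range.mp hr; omega⟩

lemma pvPrimesL_one : pvPrimesL 1 = [] := by decide

lemma pvPrimesL_succ (n : Nat) :
    pvPrimesL (n+1) = pvPrimesL n ++ (if (n+1).Prime then [((n+1:Nat):Int)] else []) := by
  unfold pvPrimesL
  rw [List.range_succ, List.filter_append, List.map_append]
  congr 1
  by_cases hp : (n+1).Prime
  · rw [if_pos hp]
    simp [hp]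
  · rw [if_neg hp]
    simp [hp]

lemma pv_G_update (m k : Nat) (hm : 2 ≤ m)
    (hnomark : ¬ (¬ k.Prime ∧ 2 ≤ k ∧ k / k.minFac = m)) :
    (if k = m then pvPhi m else pvG (m-1) k) = pvG m k := by
  by_cases hkm : k = m
  · subst hkm
    rw [if_pos rfl]
    unfold pvG
    rw [if_neg (by omega), if_pos (Or.inl (le_refl k))]
  · rw [if_neg hkm]
    by_cases hk1 : k ≤ 1
    · rw [pvG_le_one _ _ hk1, pvG_le_one _ _ hk1]
    · unfold pvG
      rw [if_neg hk1, if_neg hk1]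
      by_cases hle : k ≤ m - 1
      · rw [if_pos (Or.inl hle), if_pos (Or.inl (by omega))]
      · by_cases hcomp : ¬ k.Prime ∧ k / k.minFac ≤ m - 1
        · rw [if_pos (Or.inr hcomp), if_pos (Or.inr ⟨hcomp.1, by omega⟩)]
        · rw [if_neg (fun hor : _ ∨ _ => hor.elim (fun h => hle h) (fun h => hcomp h)), if_neg]
          rintro (h | ⟨hnp, hd⟩)
          · omega
          · by_cases heq : k / k.minFac = m
            · exact hnomark ⟨hnp, by omega, heq⟩
            · exact hcomp ⟨hnp, by omega⟩

lemma pv_markphase_B (N : Int) (m : Nat) (hm : 2 ≤ m) (hmN : (m:Int) ≤ N) :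
    pvB_mark N (m:Int)
        ((List.range (pvM N)).map (fun k => if k = m then pvPhi m else pvG (m-1) k))
        (pvPrimesL m)
      = (List.range (pvM N)).map (fun k => pvG m k) := by
  rw [pv_mark_spec N m hm hmN (pvPrimesL m)
    (fun k => if k = m then pvPhi m else pvG (m-1) k)
    (pvPrimesL_sorted m) (pvPrimesL_primes m)
    (pvPrimesL_mem m m.minFac (Nat.minFac_prime (by omega)) (Nat.minFac_le (by omega)))
    (by simp)]
  apply List.map_congr_left
  intro k hk
  have hkM : k < pvM N := List.mem_range.mp hk
  have hkN : (k:Int) ≤ N := by unfold pvM at hkM; omega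
  by_cases hany : ((pvPrimesL m).any (fun p =>
      decide (p * m ≤ N) && decide (((k:Nat):Int) = p * m) && decide (p ≤ (m.minFac : Int)))) = true
  · rw [if_pos hany]
    obtain ⟨x, hx, hpx⟩ := List.any_eq_true.mp hany
    simp only [Bool.and_eq_true, decide_eq_true_eq] at hpx
    obtain ⟨⟨h1, h2⟩, h3⟩ := hpx
    obtain ⟨q, hq, -, rfl⟩ := pvPrimesL_mem_le m x hx
    have hkqm : k = q * m := by exact_mod_cast h2
    have hqle : q ≤ m.minFac := by exact_mod_cast h3
    obtain ⟨hnp, hk2, hdiv⟩ := (pv_newly_marked m k hm).mp ⟨q, hq, hqle, hkqm⟩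
    unfold pvG
    rw [if_neg (by omega), if_pos (Or.inr ⟨hnp, by omega⟩)]
  · rw [if_neg (by simpa using hany)]
    apply pv_G_update m k hm
    rintro ⟨hnp, hk2, heq⟩
    apply (by simpa using hany :
      ¬ ((pvPrimesL m).any (fun p =>
        decide (p * m ≤ N) && decide (((k:Nat):Int) = p * m) && decide (p ≤ (m.minFac : Int)))) = true)
    obtain ⟨q, hq, hqle, hkqm⟩ := (pv_newly_marked m k hm).mpr ⟨hnp, hk2, heq⟩
    apply List.any_eq_true.mpr
    refine ⟨(q:Int), pvPrimesL_mem m q hq (le_trans hqle (Nat.minFac_le (by omega))), ?_⟩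
    simp only [Bool.and_eq_true, decide_eq_true_eq]
    refine ⟨⟨?_, by exact_mod_cast hkqm⟩, by exact_mod_cast hqle⟩
    calc (q:Int) * m = ((q * m : Nat) : Int) := by push_cast; ring
      _ = (k:Int) := by exact_mod_cast hkqm.symm
      _ ≤ N := hkN

lemma pv_outer_B (N : Int) (c : Nat) (hc : (2 + (c:Int)) ≤ N + 1) :
    (PySem.List.pyRange 2 (2 + (c:Int)) 1).foldl
        (fun (st : List Int × List Int) i =>
          let phi := st.1
          let primes := st.2
          let st2 :=
            if PySem.List.pyGetD phi i 0 == 0 then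
              (PySem.List.pySetD phi i (i - 1), primes ++ [i])
            else (phi, primes)
          (pvB_mark N i st2.1 st2.2, st2.2))
        ((List.range (pvM N)).map (fun k => pvG 1 k), ([] : List Int))
      = ((List.range (pvM N)).map (fun k => pvG (1 + c) k), pvPrimesL (1 + c)) := by
  induction c with
  | zero =>
    rw [show ((0:Nat):Int) = 0 by norm_num]
    rw [PySem.List.pyRange_one_eq_nil (by omega), List.foldl_nil, Nat.add_zero, pvPrimesL_one]
  | succ c ih =>
    have hc' : 2 + (c:Int) ≤ N + 1 := by push_cast at hc ⊢; omega
    rw [show (2 + ((c+1:Nat):Int)) = (2 + (c:Int)) + 1 by push_cast; ring]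
    rw [PySem.List.pyRange_one_succ_right (by omega), List.foldl_append, ih hc']
    simp only [List.foldl_cons, List.foldl_nil]
    set m : Nat := c + 2 with hm
    have him : (2 + (c:Int)) = (m:Int) := by omega
    have hmN : (m:Int) ≤ N := by omega
    have hm2 : 2 ≤ m := by omega
    have hjM : ((m:Int)).toNat < pvM N := by unfold pvM; omega
    have h1c : 1 + c = m - 1 := by omega
    have h1c2 : 1 + (c + 1) = m := by omega
    rw [him, h1c, h1c2]
    rw [pv_pyGetD_map _ _ _ (by positivity) hjM, show ((m:Int)).toNat = m by omega]
    have hsucc : pvPrimesL m = pvPrimesL (m-1)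
        ++ (if m.Prime then [((m:Nat):Int)] else []) := by
      conv_lhs => rw [show m = (m-1)+1 by omega]
      rw [pvPrimesL_succ (m-1), show (m-1)+1 = m by omega]
    by_cases hp : m.Prime
    · have hb : (pvG (m-1) m == (0:Int)) = true :=
        beq_iff_eq.mpr (pvG_prime_self m hm2 hp)
      rw [hb, if_pos rfl]
      simp only
      rw [pv_pySetD_map _ _ _ _ (by positivity), show ((m:Int)).toNat = m by omega]
      have hphi : ((m:Int) - 1) = pvPhi m := by
        unfold pvPhi
        rw [Nat.totient_prime hp]
        omega
      have hprimes : pvPrimesL (m-1) ++ [((m:Nat):Int)] = pvPrimesL m := by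
        rw [hsucc, if_pos hp]
      rw [hphi, hprimes, pv_markphase_B N m hm2 hmN]
    · have hb : (pvG (m-1) m == (0:Int)) = false := by
        rw [beq_eq_false_iff_ne, pvG_composite_self m hm2 hp]
        exact (pvPhi_pos m (by omega)).ne'
      rw [hb, if_neg (by simp)]
      simp only
      have hprimes : pvPrimesL (m-1) = pvPrimesL m := by
        rw [hsucc, if_neg hp, List.append_nil]
      have hmapH : (List.range (pvM N)).map (fun k => pvG (m-1) k)
          = (List.range (pvM N)).map (fun k => if k = m then pvPhi m else pvG (m-1) k) := by
        apply List.map_congr_left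
        intro k _
        by_cases hkm : k = m
        · subst hkm
          rw [if_pos rfl, pvG_composite_self m hm2 hp]
        · rw [if_neg hkm]
      rw [hmapH, hprimes, pv_markphase_B N m hm2 hmN]

lemma pv_prefix_B (N : Int) (c : Nat) (hc : (c:Int) ≤ N) :
    (PySem.List.pyRange 1 (1 + (c:Int)) 1).foldl
        (fun (acc : Int × List Int) i =>
          (acc.1 + PySem.List.pyGetD (pvPhiL N) i 0,
            PySem.List.pySetD acc.2 i (acc.1 + PySem.List.pyGetD (pvPhiL N) i 0)))
        ((0:Int), List.replicate (pvM N) (0:Int))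
      = (pvS c, (List.range (pvM N)).map (fun k => if k ≤ c then pvS k else 0)) := by
  induction c with
  | zero =>
    rw [show ((0:Nat):Int) = 0 by norm_num]
    rw [PySem.List.pyRange_one_eq_nil (by omega), List.foldl_nil, pv_replicate_map]
    rw [show pvS 0 = 0 by simp [pvS]]
    congr 1
    apply List.map_congr_left
    intro k _
    by_cases h : k ≤ 0
    · rw [if_pos h, show k = 0 by omega, show pvS 0 = 0 by simp [pvS]]
    · rw [if_neg h]
  | succ c ih =>
    have hc' : (c:Int) ≤ N := by push_cast at hc ⊢; omega
    rw [show (1 + ((c+1:Nat):Int)) = (1 + (c:Int)) + 1 by push_cast; ring]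
    rw [PySem.List.pyRange_one_succ_right (by omega), List.foldl_append, ih hc']
    simp only [List.foldl_cons, List.foldl_nil]
    have him : (1 + (c:Int)) = (((c+1:Nat)):Int) := by push_cast; ring
    have hc1M : (((c+1:Nat)):Int).toNat < pvM N := by unfold pvM; omega
    rw [him]
    unfold pvPhiL
    rw [pv_pyGetD_map _ _ _ (by positivity) hc1M, show ((((c+1:Nat)):Int)).toNat = c + 1 by omega]
    have hstep : pvS c + pvPhi (c+1) = pvS (c+1) := by
      unfold pvS pvPhi
      rw [Finset.sum_range_succ (n := c+1)]
      push_cast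
      ring
    rw [hstep, pv_pySetD_map _ _ _ _ (by positivity), show ((((c+1:Nat)):Int)).toNat = c + 1 by omega]
    congr 1
    apply List.map_congr_left
    intro k _
    by_cases hk : k = c + 1
    · subst hk
      rw [if_pos rfl, if_pos (le_refl _)]
    · rw [if_neg hk]
      by_cases hk2 : k ≤ c
      · rw [if_pos hk2, if_pos (by omega)]
      · rw [if_neg hk2, if_neg (by omega)]

lemma pv_init_B (N : Int) :
    (if N ≥ 1 then PySem.List.pySetD (List.replicate (pvM N) (0:Int)) 1 1
      else List.replicate (pvM N) (0:Int))
      = (List.range (pvM N)).map (fun k => pvG 1 k) := by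
  rw [pv_replicate_map]
  by_cases h1 : N ≥ 1
  · rw [if_pos h1, pv_pySetD_map _ _ _ _ (by norm_num)]
    apply List.map_congr_left
    intro k hk
    have hkM : k < pvM N := List.mem_range.mp hk
    rw [show ((1:Int)).toNat = 1 from rfl]
    by_cases hk1 : k = 1
    · subst hk1
      rw [if_pos rfl, pvG_le_one 1 1 (le_refl 1)]
      norm_num
    · rw [if_neg hk1]
      by_cases hk0 : k = 0
      · subst hk0
        rw [pvG_le_one 1 0 (by omega)]
        norm_num
      · unfold pvG
        rw [if_neg (by omega), if_neg]
        rintro (h | ⟨hnp, hd⟩)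
        · omega
        · have := pv_div_minFac_ge_two k (by omega) hnp
          omega
  · rw [if_neg h1]
    apply List.map_congr_left
    intro k hk
    have hkM : k < pvM N := List.mem_range.mp hk
    have hk0 : k = 0 := by unfold pvM at hkM; omega
    subst hk0
    rw [pvG_le_one 1 0 (by omega)]
    norm_num

lemma pv_G_total (N : Int) (i k : Nat) (hk : k < pvM N) (hi : N ≤ (i:Int)) :
    pvG i k = pvPhi k := by
  by_cases hk1 : k ≤ 1
  · exact pvG_eq_phi_of_le_one i k hk1
  · unfold pvG
    rw [if_neg hk1, if_pos]
    left
    unfold pvM at hk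
    omega

theorem pv_B_eq (N : Int) : precompute_visible_points_alt N = pvTarget N := by
  simp only [precompute_visible_points_alt]
  rw [show (N + 1).toNat = pvM N from rfl, pv_init_B]
  have hphi : ((PySem.List.pyRange 2 (N + 1) 1).foldl
      (fun (st : List Int × List Int) i =>
        let phi := st.1
        let primes := st.2
        let st2 :=
          if PySem.List.pyGetD phi i 0 == 0 then
            (PySem.List.pySetD phi i (i - 1), primes ++ [i])
          else (phi, primes)
        (pvB_mark N i st2.1 st2.2, st2.2))
      ((List.range (pvM N)).map (fun k => pvG 1 k), ([] : List Int))).1 = pvPhiL N := by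
    by_cases hN : 2 ≤ N
    · set c : Nat := (N - 1).toNat with hcdef
      rw [show PySem.List.pyRange 2 (N + 1) 1 = PySem.List.pyRange 2 (2 + (c:Int)) 1 by
        congr 1
        omega]
      rw [pv_outer_B N c (by omega)]
      unfold pvPhiL
      apply List.map_congr_left
      intro k hk
      exact pv_G_total N (1+c) k (List.mem_range.mp hk) (by omega)
    · rw [PySem.List.pyRange_one_eq_nil (by omega), List.foldl_nil]
      unfold pvPhiL
      apply List.map_congr_left
      intro k hk
      exact pv_G_total N 1 k (List.mem_range.mp hk) (by unfold pvM at *; omega)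
  rw [hphi]
  by_cases hN : 0 ≤ N
  · set c : Nat := N.toNat with hcdef
    rw [show PySem.List.pyRange 1 (N + 1) 1 = PySem.List.pyRange 1 (1 + (c:Int)) 1 by
      congr 1
      omega]
    rw [pv_prefix_B N c (by omega)]
    unfold pvTarget
    apply List.map_congr_left
    intro k hk
    have hkM : k < pvM N := List.mem_range.mp hk
    rw [if_pos (by unfold pvM at hkM; omega)]
  · have hM : pvM N = 0 := by unfold pvM; omega
    rw [PySem.List.pyRange_one_eq_nil (by omega), List.foldl_nil]
    unfold pvTarget
    rw [hM]
    simp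


-- ===== VERDICT (by name: the statement is the Claim_ definition above) =====
theorem precompute_visible_points_spec : Claim_equal_precompute_visible_points := by
  intro max_n _
  unfold Spec_precompute_visible_points
  rw [pv_A_eq, pv_B_eq]
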